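-- pv_equiv track=rewrite | github.com/kou1046/lab-project | backend/mypkg/device_log_restorer/mouse_pos_collection.py | get_prev_indices
-- ===== SOURCE A (Python) =====
-- def get_prev_indices(index: int, prev_num: int):
--     indices: list[int] = []
--     min_ = index - prev_num
--     for i in range(min_, index + 1):
--         if i < 0:
--             indices.append(0)
--         else:
--             indices.append(i)
--     return indices
-- ===== SOURCE B (Python) =====
-- def get_prev_indices(index: int, prev_num: int):
--     tail = list(range(max(0, index - prev_num), index + 1))
--     total = max(0, prev_num + 1)
--     zeros = total - len(tail)
--     return [0] * zeros + tail
-- ===== Notes on version B (the rewrite author's own statement) =====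
-- stated objective: alternative
-- what changed: Replaces the per-element clamping loop with a block decomposition: a zero-block of computed length concatenated with the increasing range starting at max(0, index - prev_num).
import Mathlib
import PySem

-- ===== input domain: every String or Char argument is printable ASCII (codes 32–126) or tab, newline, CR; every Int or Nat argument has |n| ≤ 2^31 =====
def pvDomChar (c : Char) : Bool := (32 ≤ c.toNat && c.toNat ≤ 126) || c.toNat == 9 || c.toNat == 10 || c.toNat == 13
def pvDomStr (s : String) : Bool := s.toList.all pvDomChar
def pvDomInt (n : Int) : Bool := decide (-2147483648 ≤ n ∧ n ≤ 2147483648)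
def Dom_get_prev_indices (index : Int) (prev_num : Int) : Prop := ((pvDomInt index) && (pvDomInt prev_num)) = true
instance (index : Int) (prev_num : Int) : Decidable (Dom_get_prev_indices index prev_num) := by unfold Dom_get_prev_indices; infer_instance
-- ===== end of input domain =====

-- B replaces A's per-element clamping loop by a zero-block plus an increasing range; alternative decomposition, same cost.

-- ===== PORT A =====
def get_prev_indices (index : Int) (prev_num : Int) : List Int :=
  let min_ := index - prev_num
  (PySem.List.pyRange min_ (index + 1) 1).foldl
    (fun indices i => if i < 0 then indices ++ [0] else indices ++ [i]) []

-- ===== PORT B =====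
def get_prev_indices_alt (index : Int) (prev_num : Int) : List Int :=
  let tail := PySem.List.pyRange (max 0 (index - prev_num)) (index + 1) 1
  let total := max 0 (prev_num + 1)
  let zeros := (total - (tail.length : Int)).toNat
  List.replicate zeros 0 ++ tail

-- ===== PRECONDITION & SPEC =====
def Spec_get_prev_indices (index : Int) (prev_num : Int) (out : List Int) : Prop := out = get_prev_indices_alt index prev_num
instance (index : Int) (prev_num : Int) (out : List Int) : Decidable (Spec_get_prev_indices index prev_num out) := by unfold Spec_get_prev_indices; infer_instance

-- ===== CLAIM (what is proved, stated in full; the proofs are below) =====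
def Claim_equal_get_prev_indices : Prop := ∀ (index : Int) (prev_num : Int), Dom_get_prev_indices index prev_num → Spec_get_prev_indices index prev_num (get_prev_indices index prev_num)

-- ===== LEMMAS AND PROOFS =====

-- A's foldl-append loop is a map.
theorem foldl_push (l : List Int) (acc : List Int) :
    l.foldl (fun a x => if x < 0 then a ++ [0] else a ++ [x]) acc
      = acc ++ l.map (fun x => if x < 0 then (0:Int) else x) := by
  induction l generalizing acc with
  | nil => simp
  | cons x xs ih =>
    by_cases hx : x < 0 <;> simp [List.foldl, hx, ih]

theorem map_clamp_neg (a b : Int) (hb : b ≤ 0) :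
    (PySem.List.pyRange a b 1).map (fun i => if i < 0 then (0:Int) else i)
      = List.replicate (b - a).toNat 0 := by
  have h : ∀ x ∈ PySem.List.pyRange a b 1,
      (fun i => if i < 0 then (0:Int) else i) x = 0 := by
    intro x hx
    rw [PySem.List.mem_pyRange_one] at hx
    simp only; rw [if_pos (by omega)]
  rw [List.map_congr_left h, List.map_const', PySem.List.length_pyRange_one]

theorem map_clamp_nonneg (a b : Int) (ha : 0 ≤ a) :
    (PySem.List.pyRange a b 1).map (fun i => if i < 0 then (0:Int) else i)
      = PySem.List.pyRange a b 1 := by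
  have h : ∀ x ∈ PySem.List.pyRange a b 1,
      (fun i => if i < 0 then (0:Int) else i) x = id x := by
    intro x hx
    rw [PySem.List.mem_pyRange_one] at hx
    simp only [id]; rw [if_neg (by omega)]
  rw [List.map_congr_left h, List.map_id]

-- ===== VERDICT (by name: the statement is the Claim_ definition above) =====
theorem get_prev_indices_spec : Claim_equal_get_prev_indices := by
  unfold Claim_equal_get_prev_indices Spec_get_prev_indices
  intro index prev_num _
  unfold get_prev_indices get_prev_indices_alt
  simp only
  rw [foldl_push _ [], List.nil_append]
  rcases le_or_gt (index - prev_num) (index + 1) with hle | hgt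
  · rcases le_or_gt 0 (index - prev_num) with h0 | h0
    · -- no clamping: tail is the whole range, zero block empty
      have hm : max 0 (index - prev_num) = index - prev_num := by omega
      rw [map_clamp_nonneg _ _ h0, hm, PySem.List.length_pyRange_one]
      have hz : (max 0 (prev_num + 1) - ((index + 1 - (index - prev_num)).toNat : Int)).toNat = 0 := by
        omega
      rw [hz]; simp
    · rcases le_or_gt 0 (index + 1) with hb | hb
      · -- split at 0: clamped prefix ++ identity suffix
        have hm : max 0 (index - prev_num) = 0 := by omega
        rw [PySem.List.pyRange_one_append (index - prev_num) 0 (index + 1) (by omega) hb,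
            List.map_append, map_clamp_neg _ _ le_rfl, map_clamp_nonneg 0 _ le_rfl,
            hm, PySem.List.length_pyRange_one]
        have hz : (max 0 (prev_num + 1) - (((index + 1 - 0).toNat : Nat) : Int)).toNat
            = (0 - (index - prev_num)).toNat := by omega
        rw [hz]
      · -- whole range negative: all zeros, tail empty
        have hm : max 0 (index - prev_num) = 0 := by omega
        rw [map_clamp_neg _ _ (by omega), hm,
            PySem.List.pyRange_one_eq_nil (show index + 1 ≤ 0 by omega)]
        simp only [List.length_nil, List.append_nil]
        have hz : (max 0 (prev_num + 1) - ((0:Nat) : Int)).toNat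
            = (index + 1 - (index - prev_num)).toNat := by omega
        rw [hz]
  · -- empty range both sides (prev_num < 0)
    rw [PySem.List.pyRange_one_eq_nil (show index + 1 ≤ index - prev_num by omega)]
    rw [PySem.List.pyRange_one_eq_nil (show index + 1 ≤ max 0 (index - prev_num) by omega)]
    simp only [List.map_nil, List.length_nil]
    have hz : (max 0 (prev_num + 1) - ((0:Nat) : Int)).toNat = 0 := by omega
    rw [hz]; simp
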